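-- pv_equiv track=rewrite | github.com/yonysek/B3B33ALP | Homeworks/10/nurikabenvm2.py | reachableTilesFromPosition
-- ===== SOURCE A (Python) =====
-- def distance(board, i, j, toI, toJ):
--     distance = abs(toI - i) + abs(toJ - j)
--     return distance
--
-- def reachableTilesFromPosition(board, i, j, d):
--     reachableTiles = [[i, j]]
--
--     # Finds the number of remaining tiles to be added to the island
--     for k in range(d, 0, -1):
--         for iC in range(len(board)):
--             for jC in range(len(board)):
--                 if distance(board, i, j, iC, jC) == k:
--                     reachableTiles.append([iC, jC])
--     return reachableTiles
-- ===== SOURCE B (Python) =====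
-- def reachableTilesFromPosition(board, i, j, d):
--     n = len(board)
--     buckets = {}
--     for iC in range(n):
--         for jC in range(n):
--             dist = abs(iC - i) + abs(jC - j)
--             if 1 <= dist <= d:
--                 buckets.setdefault(dist, []).append([iC, jC])
--     result = [[i, j]]
--     for k in range(d, 0, -1):
--         result += buckets.get(k, [])
--     return result
-- ===== Notes on version B (the rewrite author's own statement) =====
-- stated objective: faster
-- what changed: Instead of rescanning the whole board once per distance k (d full n² scans), B makes a single pass over the board bucketing tiles by Manhattan distance into a dict, then concatenates the buckets for k = d..1.
import Mathlib
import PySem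

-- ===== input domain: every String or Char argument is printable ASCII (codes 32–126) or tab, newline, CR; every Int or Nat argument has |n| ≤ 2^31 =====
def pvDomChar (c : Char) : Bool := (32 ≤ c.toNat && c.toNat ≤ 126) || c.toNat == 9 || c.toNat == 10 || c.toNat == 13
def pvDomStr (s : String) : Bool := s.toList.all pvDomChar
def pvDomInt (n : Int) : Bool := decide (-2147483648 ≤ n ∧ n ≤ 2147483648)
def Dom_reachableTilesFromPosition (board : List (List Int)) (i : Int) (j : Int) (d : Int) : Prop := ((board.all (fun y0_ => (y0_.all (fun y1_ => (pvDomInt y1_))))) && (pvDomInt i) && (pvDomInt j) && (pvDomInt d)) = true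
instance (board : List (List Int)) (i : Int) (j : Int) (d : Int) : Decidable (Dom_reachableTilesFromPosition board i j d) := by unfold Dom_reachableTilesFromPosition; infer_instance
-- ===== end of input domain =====

-- B replaces A's d scans of the whole board (one per distance k) by a single board pass
-- that buckets tiles by their Manhattan distance, then concatenates buckets for k = d..1.

-- ===== PORT A =====
def distance (board : List (List Int)) (i : Int) (j : Int) (toI : Int) (toJ : Int) : Int :=
  |toI - i| + |toJ - j|

def reachableTilesFromPosition (board : List (List Int)) (i : Int) (j : Int) (d : Int) : List (List Int) :=
  (PySem.List.pyRange d 0 (-1)).foldl (fun acc k =>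
    (PySem.List.pyRange 0 (board.length : Int) 1).foldl (fun acc iC =>
      (PySem.List.pyRange 0 (board.length : Int) 1).foldl (fun acc jC =>
        if distance board i j iC jC = k then acc ++ [[iC, jC]] else acc) acc) acc) [[i, j]]

-- ===== PORT B =====
def reachableTilesFromPosition_alt (board : List (List Int)) (i : Int) (j : Int) (d : Int) : List (List Int) :=
  let n : Int := (board.length : Int)
  -- buckets.setdefault(dist, []).append([iC, jC])  ==  modify dist [] (· ++ [[iC, jC]])
  let buckets : PySem.Dict Int (List (List Int)) :=
    (PySem.List.pyRange 0 n 1).foldl (fun b iC =>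
      (PySem.List.pyRange 0 n 1).foldl (fun b jC =>
        let dist := |iC - i| + |jC - j|
        if 1 ≤ dist ∧ dist ≤ d then b.modify dist [] (fun x => x ++ [[iC, jC]]) else b) b)
      PySem.Dict.empty
  (PySem.List.pyRange d 0 (-1)).foldl (fun res k => res ++ buckets.getD k []) [[i, j]]

-- ===== PRECONDITION & SPEC =====
def Spec_reachableTilesFromPosition (board : List (List Int)) (i : Int) (j : Int) (d : Int) (out : List (List Int)) : Prop := out = reachableTilesFromPosition_alt board i j d
instance (board : List (List Int)) (i : Int) (j : Int) (d : Int) (out : List (List Int)) : Decidable (Spec_reachableTilesFromPosition board i j d out) := by unfold Spec_reachableTilesFromPosition; infer_instance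

-- ===== CLAIM (what is proved, stated in full; the proofs are below) =====
def Claim_equal_reachableTilesFromPosition : Prop := ∀ (board : List (List Int)) (i : Int) (j : Int) (d : Int), Dom_reachableTilesFromPosition board i j d → Spec_reachableTilesFromPosition board i j d (reachableTilesFromPosition board i j d)

-- ===== LEMMAS AND PROOFS =====

-- The (distance, tile) pairs B's bucketing pass processes, as one flat list.
def pvPairs (board : List (List Int)) (i : Int) (j : Int) (d : Int) : List (Int × List Int) :=
  (PySem.List.pyRange 0 (board.length : Int) 1).flatMap (fun iC =>
    ((PySem.List.pyRange 0 (board.length : Int) 1).filter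
        (fun jC => decide (1 ≤ |iC - i| + |jC - j| ∧ |iC - i| + |jC - j| ≤ d))).map
      (fun jC => (|iC - i| + |jC - j|, [iC, jC])))

lemma buckets_eq_pairs (board : List (List Int)) (i j d : Int) :
    (PySem.List.pyRange 0 (board.length : Int) 1).foldl (fun b iC =>
      (PySem.List.pyRange 0 (board.length : Int) 1).foldl (fun b jC =>
        let dist := |iC - i| + |jC - j|
        if 1 ≤ dist ∧ dist ≤ d then b.modify dist [] (fun x => x ++ [[iC, jC]]) else b) b)
      (PySem.Dict.empty : PySem.Dict Int (List (List Int)))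
    = (pvPairs board i j d).foldl (fun b p => b.modify p.1 [] (fun x => x ++ [p.2])) PySem.Dict.empty := by
  unfold pvPairs
  rw [List.foldl_flatMap]
  simp only [List.foldl_map, List.foldl_filter, decide_eq_true_eq]

lemma bucket_getD (board : List (List Int)) (i j d k : Int) (hk : 0 < k ∧ k ≤ d) :
    ((pvPairs board i j d).foldl (fun b p => b.modify p.1 [] (fun x => x ++ [p.2]))
        (PySem.Dict.empty : PySem.Dict Int (List (List Int)))).getD k []
    = (PySem.List.pyRange 0 (board.length : Int) 1).flatMap (fun iC =>
        ((PySem.List.pyRange 0 (board.length : Int) 1).filter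
            (fun jC => decide (distance board i j iC jC = k))).map (fun jC => [iC, jC])) := by
  rw [PySem.Dict.getD_foldl_modify_append]
  unfold pvPairs
  simp only [PySem.Dict.getD_empty, List.nil_append, List.filter_flatMap, List.filter_map,
    List.map_flatMap, List.map_map, List.filter_filter]
  apply List.flatMap_congr
  intro iC _
  congr 1
  apply List.filter_congr
  intro jC _
  simp only [Function.comp_apply, distance, beq_eq_decide]
  by_cases h : |iC - i| + |jC - j| = k
  · simp [h]; omega
  · simp [h]

lemma portA_eq_flatMap (board : List (List Int)) (i j d : Int) :
    reachableTilesFromPosition board i j d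
    = [[i, j]] ++ (PySem.List.pyRange d 0 (-1)).flatMap (fun k =>
        (PySem.List.pyRange 0 (board.length : Int) 1).flatMap (fun iC =>
          ((PySem.List.pyRange 0 (board.length : Int) 1).filter
              (fun jC => decide (distance board i j iC jC = k))).map (fun jC => [iC, jC]))) := by
  unfold reachableTilesFromPosition
  simp only [PySem.List.foldl_append_ite, PySem.List.foldl_append_eq_flatMap]

-- ===== VERDICT (by name: the statement is the Claim_ definition above) =====
theorem reachableTilesFromPosition_spec : Claim_equal_reachableTilesFromPosition := by
  intro board i j d _
  unfold Spec_reachableTilesFromPosition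
  show reachableTilesFromPosition board i j d =
    (PySem.List.pyRange d 0 (-1)).foldl (fun res k => res ++
      ((PySem.List.pyRange 0 (board.length : Int) 1).foldl (fun b iC =>
        (PySem.List.pyRange 0 (board.length : Int) 1).foldl (fun b jC =>
          let dist := |iC - i| + |jC - j|
          if 1 ≤ dist ∧ dist ≤ d then b.modify dist [] (fun x => x ++ [[iC, jC]]) else b) b)
        PySem.Dict.empty).getD k []) [[i, j]]
  rw [portA_eq_flatMap, buckets_eq_pairs, PySem.List.foldl_append_eq_flatMap]
  congr 1
  apply List.flatMap_congr
  intro k hk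
  rw [PySem.List.mem_pyRange_neg_one] at hk
  exact (bucket_getD board i j d k hk).symm
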